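-- pv_equiv track=rewrite | github.com/Padliwinata/visual-bmkg | util.py | fill_empty_month
-- ===== SOURCE A (Python) =====
-- def fill_empty_month(dict_df):
--     months = ["%.2d" % i for i in range(1, 13)]
--     empty = ['empty', 'empty']
--
--     for key, value in dict_df.items():
--         if len(dict_df[key]) < 12:
--             for x in range(12):
--                 try:
--                     if dict_df[key][x][0][3:5] != months[x]:
--                         dict_df[key].insert(x, empty)
--                 except:
--                     dict_df[key].insert(x, empty)
--     return dict_df
-- ===== SOURCE B (Python) =====
-- def fill_empty_month(dict_df):
--     months = ["%.2d" % i for i in range(1, 13)]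
--     empty = ['empty', 'empty']
--
--     for key, value in dict_df.items():
--         if len(value) < 12:
--             result = []
--             p = 0
--             for x in range(12):
--                 if p < len(value) and value[p] and value[p][0][3:5] == months[x]:
--                     result.append(value[p])
--                     p += 1
--                 else:
--                     result.append(empty)
--             result.extend(value[p:])
--             value[:] = result
--     return dict_df
-- ===== Notes on version B (the rewrite author's own statement) =====
-- stated objective: simpler
-- what changed: Replaced A's in-place insert-into-and-re-read-the-same-list loop (with a bare except around the re-read) with a two-pointer merge: one pointer over the original entries, appending either the matching entry or the placeholder into a fresh list, then the leftover tail.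
import Mathlib
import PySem

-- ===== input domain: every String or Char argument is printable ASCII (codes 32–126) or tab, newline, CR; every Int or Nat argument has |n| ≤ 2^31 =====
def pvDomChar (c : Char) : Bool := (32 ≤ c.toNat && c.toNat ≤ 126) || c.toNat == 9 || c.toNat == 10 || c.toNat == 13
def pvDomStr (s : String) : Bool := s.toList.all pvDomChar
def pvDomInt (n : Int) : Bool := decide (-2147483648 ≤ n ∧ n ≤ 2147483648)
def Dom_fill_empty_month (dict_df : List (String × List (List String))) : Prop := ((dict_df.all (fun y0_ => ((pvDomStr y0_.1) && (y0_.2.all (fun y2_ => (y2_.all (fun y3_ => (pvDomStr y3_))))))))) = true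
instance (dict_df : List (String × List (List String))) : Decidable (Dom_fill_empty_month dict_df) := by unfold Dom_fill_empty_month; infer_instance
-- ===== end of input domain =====

-- B replaces A's in-place insert-and-reread loop with a two-pointer merge building each value list
-- afresh (objective: simpler); both Pythons mutate dict_df's value lists in place — the equivalence
-- proved here is about the returned value.

-- ===== PORT A =====
-- "%.2d" % i for i in 1..12, written out as literals
def pvMonths : List String := ["01","02","03","04","05","06","07","08","09","10","11","12"]

def pvEmpty : List String := ["empty", "empty"]

-- A's inner loop: for x in range(12): try: if lst[x][0][3:5] != months[x]: lst.insert(x, empty)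
--                 except: lst.insert(x, empty)   — the bare except catches IndexError from lst[x] and row[0]
def pvFillA (lst : List (List String)) : List (List String) :=
  (List.range 12).foldl (fun acc (x : Nat) =>
    match PySem.List.pyGet? acc (x : Int) with
    | none => PySem.List.insert acc (x : Int) pvEmpty
    | some row =>
      match PySem.List.pyGet? row (0 : Int) with
      | none => PySem.List.insert acc (x : Int) pvEmpty
      | some s =>
        if PySem.Str.slice s (some 3) (some 5) ≠ pvMonths.getD x "" then
          PySem.List.insert acc (x : Int) pvEmpty
        else acc) lst

-- port of A; mutation note: the Python A mutates dict_df's lists in place and returns it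
def fill_empty_month (dict_df : List (String × List (List String))) : List (String × List (List String)) :=
  dict_df.map (fun kv => if kv.2.length < 12 then (kv.1, pvFillA kv.2) else kv)

-- ===== PORT B =====
-- B's two-pointer merge over the 12 month slots; state = (result, p)
def pvFillBStep (value : List (List String)) (st : List (List String) × Nat) (x : Nat) :
    List (List String) × Nat :=
  if st.2 < value.length ∧ value.getD st.2 [] ≠ [] ∧
      PySem.Str.slice ((value.getD st.2 []).getD 0 "") (some 3) (some 5) = pvMonths.getD x "" then
    (st.1 ++ [value.getD st.2 []], st.2 + 1)
  else (st.1 ++ [pvEmpty], st.2)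

def pvFillB (value : List (List String)) : List (List String) :=
  let st := (List.range 12).foldl (pvFillBStep value) ([], 0)
  st.1 ++ value.drop st.2

def fill_empty_month_alt (dict_df : List (String × List (List String))) : List (String × List (List String)) :=
  dict_df.map (fun kv => if kv.2.length < 12 then (kv.1, pvFillB kv.2) else kv)

-- ===== PRECONDITION & SPEC =====
def Spec_fill_empty_month (dict_df : List (String × List (List String))) (out : List (String × List (List String))) : Prop := out = fill_empty_month_alt dict_df
instance (dict_df : List (String × List (List String))) (out : List (String × List (List String))) : Decidable (Spec_fill_empty_month dict_df out) := by unfold Spec_fill_empty_month; infer_instance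

-- ===== CLAIM (what is proved, stated in full; the proofs are below) =====
def Claim_equal_fill_empty_month : Prop := ∀ (dict_df : List (String × List (List String))), Dom_fill_empty_month dict_df → Spec_fill_empty_month dict_df (fill_empty_month dict_df)

-- ===== LEMMAS AND PROOFS =====

-- The per-slot decision made at slot x when the current list is res ++ v.drop p with res.length = x.
theorem pvStep_eq (res : List (List String)) (v : List (List String)) (p : Nat) (x : Nat)
    (hx : res.length = x) :
    (match PySem.List.pyGet? (res ++ v.drop p) (x : Int) with
      | none => PySem.List.insert (res ++ v.drop p) (x : Int) pvEmpty
      | some row =>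
        match PySem.List.pyGet? row (0 : Int) with
        | none => PySem.List.insert (res ++ v.drop p) (x : Int) pvEmpty
        | some s =>
          if PySem.Str.slice s (some 3) (some 5) ≠ pvMonths.getD x "" then
            PySem.List.insert (res ++ v.drop p) (x : Int) pvEmpty
          else (res ++ v.drop p)) =
    (let st := pvFillBStep v (res, p) x; st.1 ++ v.drop st.2) := by
  subst hx
  have hins : PySem.List.insert (res ++ v.drop p) ((res.length : Nat) : Int) pvEmpty =
      res ++ pvEmpty :: v.drop p := by
    rw [PySem.List.insert_natCast _ _ _ (by simp)]
    simp
  by_cases hp : p < v.length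
  · have hdrop : v.drop p = v[p] :: v.drop (p + 1) := List.drop_eq_getElem_cons hp
    have hget : PySem.List.pyGet? (res ++ v.drop p) ((res.length : Nat) : Int) = some v[p] := by
      rw [hdrop]; exact PySem.List.pyGet?_append_length res (v.drop (p + 1)) v[p]
    have hgetD : v.getD p [] = v[p] := List.getD_eq_getElem v [] hp
    rw [hget]
    cases hrow : v[p] with
    | nil =>
      simp only [PySem.List.pyGet?_zero, List.getElem?_nil]
      rw [hins]
      simp [pvFillBStep, hrow, hp]
    | cons s rest =>
      simp only [PySem.List.pyGet?_zero_cons]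
      by_cases hs : PySem.Str.slice s (some 3) (some 5) = pvMonths.getD res.length ""
      · simp only [hs, ne_eq, not_true_eq_false, if_false]
        simp only [pvFillBStep]
        rw [if_pos ⟨hp, by rw [hgetD, hrow]; simp, by rw [hgetD, hrow]; simpa using hs⟩]
        rw [hdrop, hrow]
        simp
        rw [← List.getD_eq_getElem?_getD, hgetD, hrow]
      · simp only [ne_eq, hs, not_false_eq_true, if_true]
        rw [hins]
        simp only [pvFillBStep]
        rw [if_neg (by rintro ⟨-, -, h⟩; rw [hgetD, hrow] at h; exact hs (by simpa using h))]
        simp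
  · have hdrop : v.drop p = [] := List.drop_eq_nil_of_le (by omega)
    have hget : PySem.List.pyGet? (res ++ v.drop p) ((res.length : Nat) : Int) = none := by
      simp [hdrop, PySem.List.pyGet?_natCast]
    rw [hget, hins]
    simp [pvFillBStep, hp, hdrop]

-- Invariant carried through the fold: A's list is always B's result so far ++ the unconsumed suffix.
theorem pvFill_loop (n : Nat) : ∀ (x : Nat) (res : List (List String)) (p : Nat)
    (v : List (List String)), res.length = x →
    (List.range' x n).foldl (fun acc (x : Nat) =>
      match PySem.List.pyGet? acc (x : Int) with
      | none => PySem.List.insert acc (x : Int) pvEmpty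
      | some row =>
        match PySem.List.pyGet? row (0 : Int) with
        | none => PySem.List.insert acc (x : Int) pvEmpty
        | some s =>
          if PySem.Str.slice s (some 3) (some 5) ≠ pvMonths.getD x "" then
            PySem.List.insert acc (x : Int) pvEmpty
          else acc) (res ++ v.drop p) =
    (let st := (List.range' x n).foldl (pvFillBStep v) (res, p); st.1 ++ v.drop st.2) := by
  induction n with
  | zero => intro x res p v hx; simp
  | succ n ih =>
    intro x res p v hx
    rw [List.range'_succ]
    simp only [List.foldl_cons]
    rw [pvStep_eq res v p x hx]
    have hlen : (pvFillBStep v (res, p) x).1.length = x + 1 := by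
      simp only [pvFillBStep]
      split <;> simp [hx]
    exact ih (x + 1) (pvFillBStep v (res, p) x).1 (pvFillBStep v (res, p) x).2 v hlen

theorem pvFill_eq (v : List (List String)) : pvFillA v = pvFillB v := by
  unfold pvFillA pvFillB
  rw [List.range_eq_range']
  have := pvFill_loop 12 0 [] 0 v rfl
  simpa using this


-- ===== VERDICT (by name: the statement is the Claim_ definition above) =====
theorem fill_empty_month_spec : Claim_equal_fill_empty_month := by
  intro d _
  unfold Spec_fill_empty_month fill_empty_month fill_empty_month_alt
  simp [pvFill_eq]
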